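-- pv_equiv track=rewrite | github.com/Enjef/Algo | 2100 - 2199/2124 - Check if All A's Appears Before All B's/2124 - Check if All A's Appears Before All B's.py | checkString_best_speed
-- ===== SOURCE A (Python) =====
-- def checkString_best_speed(s: str) -> bool:
--     a_arr = []
--     b_arr = []
--     for index, letter in enumerate(s):
--         if letter == 'a':
--             a_arr.append(index)
--     for index, letter in enumerate(s):
--         if letter == 'b':
--             b_arr.append(index)
--     if len(a_arr) == 0 or len(b_arr) == 0:
--         return True
--     max_a = max(a_arr)
--     min_b = min(b_arr)
--     if min_b < max_a:
--         return False
--     else: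
--         return True
-- ===== SOURCE B (Python) =====
-- def checkString_best_speed(s: str) -> bool:
--     seen_b = False
--     for ch in s:
--         if ch == 'a' and seen_b:
--             return False
--         if ch == 'b':
--             seen_b = True
--     return True
-- ===== Notes on version B (the rewrite author's own statement) =====
-- stated objective: simpler
-- what changed: Replaced two index-collecting passes plus max/min aggregation with a single left-to-right scan holding one boolean flag and an early exit.
import Mathlib
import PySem

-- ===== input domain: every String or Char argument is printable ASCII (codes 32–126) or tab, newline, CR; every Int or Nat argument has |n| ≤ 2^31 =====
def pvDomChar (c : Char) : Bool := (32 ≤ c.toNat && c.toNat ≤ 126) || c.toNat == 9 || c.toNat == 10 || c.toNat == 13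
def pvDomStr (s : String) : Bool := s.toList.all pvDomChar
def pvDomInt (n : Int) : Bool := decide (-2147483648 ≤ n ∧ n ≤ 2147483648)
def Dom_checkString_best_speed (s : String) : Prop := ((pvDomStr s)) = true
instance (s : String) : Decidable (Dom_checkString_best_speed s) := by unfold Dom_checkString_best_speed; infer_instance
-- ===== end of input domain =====

-- B replaces A's two index-collecting passes plus max/min aggregation by one
-- left-to-right scan with a single `seen_b` flag and an early exit (objective: simpler).

-- ===== PORT A =====
def checkString_best_speed (s : String) : Bool :=
  let cs := s.toList
  let a_arr := (PySem.List.enumerate cs 0).foldl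
    (fun acc p => if p.2 = 'a' then acc ++ [p.1] else acc) ([] : List Int)
  let b_arr := (PySem.List.enumerate cs 0).foldl
    (fun acc p => if p.2 = 'b' then acc ++ [p.1] else acc) ([] : List Int)
  if a_arr.length = 0 ∨ b_arr.length = 0 then true
  else
    match PySem.List.max? a_arr (fun x => x), PySem.List.min? b_arr (fun x => x) with
    | some max_a, some min_b => if min_b < max_a then false else true
    | _, _ => true  -- unreachable: both lists are nonempty here

-- ===== PORT B =====
def pvGoB : List Char → Bool → Bool
  | [], _ => true
  | c :: rest, seen_b =>
    if c = 'a' && seen_b then false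
    else if c = 'b' then pvGoB rest true
    else pvGoB rest seen_b

def checkString_best_speed_alt (s : String) : Bool := pvGoB s.toList false

-- ===== PRECONDITION & SPEC =====
def Spec_checkString_best_speed (s : String) (out : Bool) : Prop := out = checkString_best_speed_alt s
instance (s : String) (out : Bool) : Decidable (Spec_checkString_best_speed s out) := by unfold Spec_checkString_best_speed; infer_instance

-- ===== CLAIM (what is proved, stated in full; the proofs are below) =====
def Claim_equal_checkString_best_speed : Prop := ∀ (s : String), Dom_checkString_best_speed s → Spec_checkString_best_speed s (checkString_best_speed s)

-- ===== LEMMAS AND PROOFS =====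

/-- Indices (starting at `n`) of occurrences of `c` in `cs`, as A's loop builds them. -/
def pvArr (c : Char) (cs : List Char) (n : Int) : List Int :=
  (PySem.List.enumerate cs n).foldl
    (fun acc p => if p.2 = c then acc ++ [p.1] else acc) ([] : List Int)

/-- A's core computation with an arbitrary enumeration start. -/
def pvAcore (cs : List Char) (n : Int) : Bool :=
  let a_arr := pvArr 'a' cs n
  let b_arr := pvArr 'b' cs n
  if a_arr.length = 0 ∨ b_arr.length = 0 then true
  else
    match PySem.List.max? a_arr (fun x => x), PySem.List.min? b_arr (fun x => x) with
    | some max_a, some min_b => if min_b < max_a then false else true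
    | _, _ => true

theorem pvA_eq_core (s : String) : checkString_best_speed s = pvAcore s.toList 0 := rfl

theorem pvFoldl_acc (c : Char) (l : List (Int × Char)) (acc : List Int) :
    l.foldl (fun acc p => if p.2 = c then acc ++ [p.1] else acc) acc
      = acc ++ l.foldl (fun acc p => if p.2 = c then acc ++ [p.1] else acc) [] := by
  induction l generalizing acc with
  | nil => simp
  | cons p t ih =>
    simp only [List.foldl_cons, List.nil_append]
    by_cases h : p.2 = c
    · rw [if_pos h, if_pos h, ih (acc ++ [p.1]), ih [p.1], List.append_assoc]
    · rw [if_neg h, if_neg h]; exact ih acc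

theorem pvArr_cons (c d : Char) (t : List Char) (n : Int) :
    pvArr c (d :: t) n = (if d = c then [n] else []) ++ pvArr c t (n + 1) := by
  unfold pvArr
  rw [PySem.List.enumerate_cons]
  simp only [List.foldl_cons]
  by_cases h : d = c
  · rw [if_pos h, if_pos h, List.nil_append, pvFoldl_acc]
  · rw [if_neg h, if_neg h, List.nil_append]

theorem pvArr_mem_le (c : Char) (cs : List Char) (n x : Int) (hx : x ∈ pvArr c cs n) :
    n ≤ x := by
  induction cs generalizing n with
  | nil => simp [pvArr, PySem.List.enumerate] at hx
  | cons d t ih =>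
    rw [pvArr_cons] at hx
    rcases List.mem_append.mp hx with h | h
    · by_cases hd : d = c
      · simp [hd] at h; omega
      · simp [hd] at h
    · have := ih (n + 1) h; omega

theorem pvArr_nil_iff (c : Char) (cs : List Char) (n : Int) :
    pvArr c cs n = [] ↔ ¬ c ∈ cs := by
  induction cs generalizing n with
  | nil => simp [pvArr, PySem.List.enumerate]
  | cons d t ih =>
    rw [pvArr_cons]
    by_cases hd : d = c
    · simp [hd]
    · simp [hd, ih (n + 1), Ne.symm hd]

/-- Once a `b` has been seen, B returns `true` iff no `a` remains. -/
theorem pvGoB_true (t : List Char) : pvGoB t true = !(t.contains 'a') := by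
  induction t with
  | nil => simp [pvGoB]
  | cons c r ih =>
    by_cases hc : c = 'a'
    · simp [pvGoB, hc]
    · by_cases hb : c = 'b' <;> simp [pvGoB, hc, hb, ih, Ne.symm hc]

/-- A's core on a string starting with `'b'` also returns `true` iff no `a` remains. -/
theorem pvAcore_b (t : List Char) (n : Int) : pvAcore ('b' :: t) n = !(t.contains 'a') := by
  unfold pvAcore
  rw [pvArr_cons, pvArr_cons, if_neg (by decide : ¬ ('b' : Char) = 'a'),
      if_pos (rfl : ('b' : Char) = 'b')]
  simp only [List.nil_append, List.singleton_append]
  by_cases ha : 'a' ∈ t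
  · have hne : pvArr 'a' t (n + 1) ≠ [] := by
      rw [Ne, pvArr_nil_iff]; exact not_not_intro ha
    obtain ⟨ma, hma⟩ := Option.ne_none_iff_exists'.mp
      (show PySem.List.max? (pvArr 'a' t (n + 1)) (fun x => x) ≠ none by
        simp [PySem.List.max?_eq_none_iff, hne])
    obtain ⟨mb, hmb⟩ := Option.ne_none_iff_exists'.mp
      (show PySem.List.min? (n :: pvArr 'b' t (n + 1)) (fun x => x) ≠ none by
        simp [PySem.List.min?_eq_none_iff])
    rw [if_neg (by simp [List.length_eq_zero_iff, hne]), hma, hmb]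
    have hma_ge : n + 1 ≤ ma := pvArr_mem_le _ _ _ _ (PySem.List.max?_mem hma)
    have hmb_le : mb ≤ n := PySem.List.min?_isMin hmb n (by simp)
    have hlt : mb < ma := by omega
    simp [hlt, ha]
  · have h0 : pvArr 'a' t (n + 1) = [] := (pvArr_nil_iff _ _ _).mpr ha
    rw [h0]
    simp [ha]

/-- A's core ignores a leading non-`'b'` character up to the start shift: a leading `'a'`
has the smallest index, so it never changes the max of the `a`-indices when a later `a`
exists, and the min of the `b`-indices stays above it. -/
theorem pvAcore_step (c : Char) (t : List Char) (n : Int) (hc : c ≠ 'b') :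
    pvAcore (c :: t) n = pvAcore t (n + 1) := by
  unfold pvAcore
  rw [pvArr_cons, pvArr_cons, if_neg hc]
  simp only [List.nil_append]
  by_cases hca : c = 'a'
  · rw [if_pos hca]
    by_cases hb : pvArr 'b' t (n + 1) = []
    · rw [hb]; simp
    · obtain ⟨mb, hmb⟩ := Option.ne_none_iff_exists'.mp
        (show PySem.List.min? (pvArr 'b' t (n + 1)) (fun x => x) ≠ none by
          simp [PySem.List.min?_eq_none_iff, hb])
      have hmb_ge : n + 1 ≤ mb := pvArr_mem_le _ _ _ _ (PySem.List.min?_mem hmb)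
      by_cases ha : pvArr 'a' t (n + 1) = []
      · rw [ha]
        simp only [List.cons_append, List.nil_append]
        rw [if_neg (by simp [List.length_eq_zero_iff, hb]), if_pos (by simp)]
        rw [show PySem.List.max? [n] (fun x : Int => x) = some n from
          by rw [PySem.List.max?_id_cons]; rfl, hmb]
        have hnlt : ¬ mb < n := by omega
        simp [hnlt]
      · obtain ⟨x, xs, hx⟩ := List.exists_cons_of_ne_nil ha
        have hxge : n + 1 ≤ x := pvArr_mem_le 'a' t (n + 1) x (by rw [hx]; simp)
        rw [hx]
        simp only [List.cons_append, List.nil_append]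
        rw [if_neg (by simp [List.length_eq_zero_iff, hb]),
            if_neg (by simp [List.length_eq_zero_iff, hb])]
        have hmax : PySem.List.max? (n :: x :: xs) (fun y => y)
            = PySem.List.max? (x :: xs) (fun y => y) := by
          rw [PySem.List.max?_id_cons, PySem.List.max?_id_cons]
          simp only [List.foldl_cons]
          rw [max_eq_right (by omega : n ≤ x)]
        rw [hmax]
  · rw [if_neg hca]
    simp

theorem pvMain (cs : List Char) (n : Int) : pvAcore cs n = pvGoB cs false := by
  induction cs generalizing n with
  | nil => simp [pvAcore, pvArr, PySem.List.enumerate, pvGoB]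
  | cons c t ih =>
    by_cases hb : c = 'b'
    · subst hb
      rw [pvAcore_b]
      simp [pvGoB, pvGoB_true]
    · rw [pvAcore_step c t n hb, ih (n + 1)]
      by_cases hc : c = 'a' <;> simp [pvGoB, hc, hb]

-- ===== VERDICT (by name: the statement is the Claim_ definition above) =====
theorem checkString_best_speed_spec : Claim_equal_checkString_best_speed := by
  intro s _
  unfold Spec_checkString_best_speed checkString_best_speed_alt
  rw [pvA_eq_core, pvMain]
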